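-- pv_equiv track=rewrite | github.com/richa92/Jenkin_Regression_Testing | robo4.2/fusion/tests/clrm/support_files/clrm_support_functions.py | _update_virtual_switches
-- ===== SOURCE A (Python) =====
-- def _update_virtual_switches(req, networks):
--     """
--     This function is to modify switch layout of a cluster
--     """
--     switch_details = []
--     for j in networks.split(","):
--         for i in req:
--             for k2, v2 in i.items():
--                 if k2 == "name" and v2 == j:
--                     switch_details.append(i)
--                     break
--     if switch_details:
--         return True, switch_details
--     return False, switch_details
-- ===== SOURCE B (Python) =====
-- def _update_virtual_switches(req, networks):
--     """
--     This function is to modify switch layout of a cluster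
--     """
--     index = {}
--     for i in req:
--         n = i.get("name")
--         if n is not None:
--             index.setdefault(n, []).append(i)
--     switch_details = []
--     for j in networks.split(","):
--         switch_details.extend(index.get(j, []))
--     return bool(switch_details), switch_details
-- ===== Notes on version B (the rewrite author's own statement) =====
-- stated objective: alternative
-- what changed: Replaces the nested per-network rescan of req (with an inner item-by-item key scan per dict) by a single indexing pass that groups req's dicts by their 'name' value, then one index lookup per network name; trades the repeated scans for building a hash index.
import Mathlib
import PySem

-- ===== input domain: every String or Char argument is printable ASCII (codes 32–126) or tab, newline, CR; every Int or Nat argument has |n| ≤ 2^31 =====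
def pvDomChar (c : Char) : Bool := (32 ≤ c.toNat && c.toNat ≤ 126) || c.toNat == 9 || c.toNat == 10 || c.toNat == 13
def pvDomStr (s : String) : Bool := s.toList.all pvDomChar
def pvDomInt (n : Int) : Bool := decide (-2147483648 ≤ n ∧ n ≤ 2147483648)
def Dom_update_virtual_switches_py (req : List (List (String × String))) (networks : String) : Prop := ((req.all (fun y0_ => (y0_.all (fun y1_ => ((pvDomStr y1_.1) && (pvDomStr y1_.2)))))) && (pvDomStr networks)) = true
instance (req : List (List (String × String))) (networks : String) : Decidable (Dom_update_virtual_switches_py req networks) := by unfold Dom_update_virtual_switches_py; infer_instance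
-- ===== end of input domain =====

-- B replaces the nested per-network rescan of req by one pass that builds a name->dicts index, then one lookup per network name (alternative algorithm, same observed cost).

-- ===== PORT A =====
-- inner 'for k2, v2 in i.items(): if k2 == "name" and v2 == j: append; break' — true iff the scan hits a matching item
def pvScan (j : String) : List (String × String) → Bool
  | [] => false
  | (k2, v2) :: rest => if k2 == "name" && v2 == j then true else pvScan j rest

def update_virtual_switches_py (req : List (List (String × String))) (networks : String) : Bool × (List (List (String × String))) :=
  let switch_details :=
    ((PySem.Str.split? networks ",").getD []).foldl (fun acc j =>
      req.foldl (fun acc2 i =>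
        if pvScan j (PySem.Dict.ofList i).items then acc2 ++ [i] else acc2) acc) []
  if !switch_details.isEmpty then (true, switch_details) else (false, switch_details)

-- ===== PORT B =====
def update_virtual_switches_py_alt (req : List (List (String × String))) (networks : String) : Bool × (List (List (String × String))) :=
  let index : PySem.Dict String (List (List (String × String))) :=
    req.foldl (fun d i =>
      match (PySem.Dict.ofList i).get? "name" with
      | some n => d.insert n (d.getD n [] ++ [i])
      | none => d) PySem.Dict.empty
  let switch_details :=
    ((PySem.Str.split? networks ",").getD []).foldl (fun acc j => acc ++ index.getD j []) []
  (!switch_details.isEmpty, switch_details)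

-- ===== PRECONDITION & SPEC =====
def Spec_update_virtual_switches_py (req : List (List (String × String))) (networks : String) (out : Bool × (List (List (String × String)))) : Prop := out = update_virtual_switches_py_alt req networks
instance (req : List (List (String × String))) (networks : String) (out : Bool × (List (List (String × String)))) : Decidable (Spec_update_virtual_switches_py req networks out) := by unfold Spec_update_virtual_switches_py; infer_instance

-- ===== CLAIM (what is proved, stated in full; the proofs are below) =====
def Claim_equal_update_virtual_switches_py : Prop := ∀ (req : List (List (String × String))) (networks : String), Dom_update_virtual_switches_py req networks → Spec_update_virtual_switches_py req networks (update_virtual_switches_py req networks)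

-- ===== LEMMAS AND PROOFS =====

lemma pvScan_false_of_not_mem (j : String) (l : List (String × String))
    (h : "name" ∉ l.map Prod.fst) : pvScan j l = false := by
  induction l with
  | nil => rfl
  | cons p rest ih =>
    obtain ⟨k, v⟩ := p
    simp only [List.map_cons, List.mem_cons] at h
    push Not at h
    simp only [pvScan]
    rw [if_neg, ih h.2]
    simp [Ne.symm h.1]

lemma pvScan_eq_lookup (j : String) (l : List (String × String))
    (h : (l.map Prod.fst).Nodup) :
    pvScan j l = ((PySem.Dict.mk l).get? "name" == some j) := by
  induction l with
  | nil => simp [pvScan, PySem.Dict.get?]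
  | cons p rest ih =>
    obtain ⟨k, v⟩ := p
    simp only [List.map_cons, List.nodup_cons] at h
    rw [PySem.Dict.get?_mk_cons]
    by_cases hk : k = "name"
    · subst hk
      by_cases hv : v = j
      · subst hv; simp [pvScan]
      · have : pvScan j rest = false := pvScan_false_of_not_mem j rest h.1
        simp [pvScan, hv, this]
    · simp only [pvScan]
      rw [if_neg (by simp [hk]), ih h.2]
      simp [hk]

lemma pvScan_dict (j : String) (i : List (String × String)) :
    pvScan j (PySem.Dict.ofList i).items =
      ((PySem.Dict.ofList i).get? "name" == some j) := by
  have h : ((PySem.Dict.ofList i).items.map Prod.fst).Nodup :=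
    PySem.Dict.nodup_keys_ofList i
  have := pvScan_eq_lookup j (PySem.Dict.ofList i).items h
  exact this

-- the index built by B, characterised: lookup = filter of req, in order
lemma pv_index_getD (j : String) (req : List (List (String × String)))
    (d0 : PySem.Dict String (List (List (String × String)))) :
    (req.foldl (fun d i =>
      match (PySem.Dict.ofList i).get? "name" with
      | some n => d.insert n (d.getD n [] ++ [i])
      | none => d) d0).getD j []
    = d0.getD j [] ++ req.filter (fun i => ((PySem.Dict.ofList i).get? "name" == some j)) := by
  induction req generalizing d0 with
  | nil => simp
  | cons i rest ih =>
    simp only [List.foldl_cons, List.filter_cons]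
    cases hg : (PySem.Dict.ofList i).get? "name" with
    | none => simp [ih]
    | some n =>
      rw [ih]
      rw [PySem.Dict.getD_insert]
      by_cases hj : j = n
      · subst hj; simp
      · simp [Ne.symm hj, hj]

theorem pv_details_eq (req : List (List (String × String))) (networks : String) :
    ((PySem.Str.split? networks ",").getD []).foldl (fun acc j =>
      req.foldl (fun acc2 i =>
        if pvScan j (PySem.Dict.ofList i).items then acc2 ++ [i] else acc2) acc) []
    = ((PySem.Str.split? networks ",").getD []).foldl (fun acc j =>
        acc ++ (req.foldl (fun d i =>
          match (PySem.Dict.ofList i).get? "name" with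
          | some n => d.insert n (d.getD n [] ++ [i])
          | none => d) PySem.Dict.empty).getD j []) [] := by
  apply PySem.List.foldl_congr_mem
  intro acc j _
  rw [pv_index_getD, PySem.Dict.getD_empty, List.nil_append,
    PySem.List.foldl_append_if_eq_filter]
  congr 1
  apply List.filter_congr
  intro i _
  rw [pvScan_dict]

lemma pv_last (L : List (List (String × String))) :
    (if !L.isEmpty then ((true : Bool), L) else ((false : Bool), L)) = (!L.isEmpty, L) := by
  cases h : L.isEmpty <;> rfl

-- ===== VERDICT (by name: the statement is the Claim_ definition above) =====
theorem update_virtual_switches_py_spec : Claim_equal_update_virtual_switches_py := by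
  intro req networks _
  unfold Spec_update_virtual_switches_py update_virtual_switches_py update_virtual_switches_py_alt
  rw [pv_details_eq req networks]
  exact pv_last _
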